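-- pv_equiv track=rewrite | github.com/dpsnet/Fixed-4D-Topology | extended_research/I_network_geometry/algorithms/network_data_loader.py | grid_2d
-- ===== SOURCE A (Python) =====
-- from typing import Dict, List, Tuple, Set, Optional
--
-- def grid_2d(width: int, height: int) -> Dict[int, Set[int]]:
--     """
--     Generate 2D grid network.
--
--     Args:
--         width: Grid width
--         height: Grid height
--
--     Returns:
--         Adjacency list representation
--     """
--     n = width * height
--     graph = {i: set() for i in range(n)}
--
--     def node_id(x: int, y: int) -> int:
--         return y * width + x
--
--     for y in range(height):
--         for x in range(width):
--             node = node_id(x, y)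
--
--             # Connect to neighbors
--             neighbors = []
--             if x > 0:
--                 neighbors.append(node_id(x - 1, y))
--             if x < width - 1:
--                 neighbors.append(node_id(x + 1, y))
--             if y > 0:
--                 neighbors.append(node_id(x, y - 1))
--             if y < height - 1:
--                 neighbors.append(node_id(x, y + 1))
--
--             graph[node] = set(neighbors)
--
--     return graph
-- ===== SOURCE B (Python) =====
-- def grid_2d(width, height):
--     """Edge-centric rebuild: pre-initialize every node's empty set, then enumerate
--     each undirected edge exactly once (the horizontal edges of each row, then the
--     vertical edges arriving into it) and insert it symmetrically at both endpoints."""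
--     graph = {i: set() for i in range(width * height)}
--     for y in range(height):
--         base = y * width
--         for x in range(1, width):            # horizontal edges inside row y
--             u, v = base + x - 1, base + x
--             graph[u].add(v)
--             graph[v].add(u)
--         if y > 0:                            # vertical edges from row y-1 into row y
--             for x in range(width):
--                 u, v = base - width + x, base + x
--                 graph[u].add(v)
--                 graph[v].add(u)
--     return graph
-- ===== Notes on version B (the rewrite author's own statement) =====
-- stated objective: alternative
-- what changed: Replaces A's node-centric scan that assigns each node its four boundary-checked neighbors by an edge-centric build: each undirected edge (row horizontals, then the verticals entering the row) is enumerated once and inserted symmetrically into both endpoints' pre-initialized sets.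
import Mathlib
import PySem

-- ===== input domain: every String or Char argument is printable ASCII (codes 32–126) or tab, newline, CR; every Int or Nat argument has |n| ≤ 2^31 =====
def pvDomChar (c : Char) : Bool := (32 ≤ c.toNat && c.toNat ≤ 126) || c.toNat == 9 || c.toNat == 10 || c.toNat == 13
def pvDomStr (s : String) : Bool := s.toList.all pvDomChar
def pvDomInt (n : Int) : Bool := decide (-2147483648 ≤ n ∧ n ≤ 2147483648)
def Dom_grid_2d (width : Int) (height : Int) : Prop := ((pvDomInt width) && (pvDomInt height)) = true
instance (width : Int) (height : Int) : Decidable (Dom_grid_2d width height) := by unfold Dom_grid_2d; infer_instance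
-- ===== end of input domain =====

-- B replaces A's node-centric scan (each node assigned its four boundary-checked
-- neighbors) by an edge-centric build: each undirected edge is enumerated once
-- (row horizontals, then verticals entering the row) and inserted symmetrically
-- into both endpoints' pre-initialized sets; same cost, different decomposition.

-- ===== PORT A =====
-- literal transliteration of A: n, dict pre-init over range(n), node_id helper,
-- nested y/x loops, conditional neighbor appends, graph[node] = set(neighbors)
def grid_2d (width : Int) (height : Int) : List (Int × List Int) :=
  let n := width * height
  let graph : PySem.Dict Int (PySem.Set Int) :=
    (PySem.List.pyRange 0 n 1).foldl (fun d i => d.insert i PySem.Set.empty) PySem.Dict.empty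
  let node_id : Int → Int → Int := fun x y => y * width + x
  let graph :=
    (PySem.List.pyRange 0 height 1).foldl (fun g y =>
      (PySem.List.pyRange 0 width 1).foldl (fun g x =>
        let node := node_id x y
        let neighbors : List Int :=
          ((([] ++ (if x > 0 then [node_id (x - 1) y] else []))
            ++ (if x < width - 1 then [node_id (x + 1) y] else []))
            ++ (if y > 0 then [node_id x (y - 1)] else []))
            ++ (if y < height - 1 then [node_id x (y + 1)] else [])
        g.insert node (PySem.Set.ofList neighbors)) g) graph
  graph.items

-- ===== PORT B =====
-- literal transliteration of B: dict pre-init over range(width*height), then per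
-- row y: horizontal edges (x in range(1, width)), then if y > 0 the vertical
-- edges from row y-1 (x in range(width)); each edge added to both endpoint sets.
-- graph[u].add(v) is ported as Dict.modify u ... (Set.add · v): u is always an
-- existing key here (0 ≤ u < width*height whenever the loops run), so the
-- modify default is never consulted and the port is exact.
def grid_2d_alt (width : Int) (height : Int) : List (Int × List Int) :=
  let graph : PySem.Dict Int (PySem.Set Int) :=
    (PySem.List.pyRange 0 (width * height) 1).foldl
      (fun d i => d.insert i PySem.Set.empty) PySem.Dict.empty
  let graph :=
    (PySem.List.pyRange 0 height 1).foldl (fun g y =>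
      let base := y * width
      let g :=
        (PySem.List.pyRange 1 width 1).foldl (fun g x =>
          let u := base + x - 1
          let v := base + x
          let g := g.modify u PySem.Set.empty (fun s => PySem.Set.add s v)
          g.modify v PySem.Set.empty (fun s => PySem.Set.add s u)) g
      if y > 0 then
        (PySem.List.pyRange 0 width 1).foldl (fun g x =>
          let u := base - width + x
          let v := base + x
          let g := g.modify u PySem.Set.empty (fun s => PySem.Set.add s v)
          g.modify v PySem.Set.empty (fun s => PySem.Set.add s u)) g
      else g) graph
  graph.items

-- ===== PRECONDITION & SPEC =====
def Spec_grid_2d (width : Int) (height : Int) (out : List (Int × List Int)) : Prop := out = grid_2d_alt width height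
instance (width : Int) (height : Int) (out : List (Int × List Int)) : Decidable (Spec_grid_2d width height out) := by unfold Spec_grid_2d; infer_instance

-- ===== CLAIM (what is proved, stated in full; the proofs are below) =====
def Claim_equal_grid_2d : Prop := ∀ (width : Int) (height : Int), Dom_grid_2d width height → Spec_grid_2d width height (grid_2d width height)

-- ===== LEMMAS AND PROOFS =====

-- canonical per-node neighbor set (proof-only device; both ports are reduced to it)
def pvNb (w h i : Int) : PySem.Set Int :=
  PySem.Set.ofList
    (((if 0 < PySem.Int.mod i w then [i - 1] else [])
      ++ (if PySem.Int.mod i w < w - 1 then [i + 1] else []))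
     ++ ((if 0 < PySem.Int.floordiv i w then [i - w] else [])
      ++ (if PySem.Int.floordiv i w < h - 1 then [i + w] else [])))

-- B's loop body as a flat list of (key, inserted value) operations
def pvStep (g : PySem.Dict Int (PySem.Set Int)) (p : Int × Int) : PySem.Dict Int (PySem.Set Int) :=
  g.modify p.1 PySem.Set.empty (fun s => PySem.Set.add s p.2)

def pvHorizOps (w y : Int) : List (Int × Int) :=
  (PySem.List.pyRange 1 w 1).flatMap
    (fun x => [(y * w + x - 1, y * w + x), (y * w + x, y * w + x - 1)])

def pvVertOps (w y : Int) : List (Int × Int) :=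
  (PySem.List.pyRange 0 w 1).flatMap
    (fun x => [(y * w - w + x, y * w + x), (y * w + x, y * w - w + x)])

def pvRowOps (w y : Int) : List (Int × Int) :=
  pvHorizOps w y ++ (if 0 < y then pvVertOps w y else [])

def pvAllOps (w h : Int) : List (Int × Int) :=
  (PySem.List.pyRange 0 h 1).flatMap (pvRowOps w)

theorem pv_items_mk {κ ν : Type} (l : List (κ × ν)) : (PySem.Dict.mk l).items = l := rfl

theorem pv_foldl_id {α β : Type} (l : List β) (x : α) : l.foldl (fun a _ => a) x = x := by
  induction l with
  | nil => rfl
  | cons b t ih => exact ih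

theorem pv_foldl_flat {α β γ : Type} (l : List γ) (r : γ → List β) (step : α → β → α) (d0 : α) :
    l.foldl (fun d y => (r y).foldl step d) d0 = (l.flatMap r).foldl step d0 := by
  induction l generalizing d0 with
  | nil => rfl
  | cons y t ih => simp [List.foldl_append, ih]

theorem pv_foldl_fresh (n : Int) {ν : Type} (v : Int → ν) :
    ((PySem.List.pyRange 0 n 1).foldl (fun d i => d.insert i (v i)) PySem.Dict.empty).items
      = (PySem.List.pyRange 0 n 1).map (fun i => (i, v i)) := by
  have h := PySem.Dict.items_foldl_insert_fresh (PySem.List.pyRange 0 n 1) (fun i => i) v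
    PySem.Dict.empty (by intro a _; simp) (by simp [PySem.List.nodup_pyRange_one])
  simpa using h

theorem pv_insert_map {ν : Type} (L : List Int) (f : Int → ν) (k : Int) (v : ν) (hk : k ∈ L) :
    (PySem.Dict.mk (L.map (fun i => (i, f i)))).insert k v
      = PySem.Dict.mk (L.map (fun i => (i, if i = k then v else f i))) := by
  apply PySem.Dict.ext
  have hc : (PySem.Dict.mk (L.map (fun i => (i, f i)))).contains k = true := by
    rw [PySem.Dict.contains_mk]
    simp only [List.any_eq_true]
    exact ⟨(k, f k), List.mem_map_of_mem hk, by simp⟩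
  rw [PySem.Dict.items_insert_of_contains _ _ hc, pv_items_mk, pv_items_mk, List.map_map]
  refine List.map_congr_left ?_
  intro i _
  by_cases h : i = k <;> simp [h]

theorem pv_foldl_insert_map {ν : Type} (ks : List Int) :
    ∀ (L : List Int) (g f : Int → ν), (∀ k ∈ ks, k ∈ L) →
      ks.foldl (fun d k => d.insert k (g k)) (PySem.Dict.mk (L.map (fun i => (i, f i))))
        = PySem.Dict.mk (L.map (fun i => (i, if i ∈ ks then g i else f i))) := by
  induction ks with
  | nil => intro L g f _; simp
  | cons k t ih =>
      intro L g f hsub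
      rw [List.foldl_cons, pv_insert_map L f k (g k) (hsub k (by simp))]
      rw [ih L g (fun i => if i = k then g k else f i) (fun j hj => hsub j (by simp [hj]))]
      congr 1
      refine List.map_congr_left ?_
      intro i _
      by_cases h1 : i ∈ t <;> by_cases h2 : i = k <;> simp [h1, h2]

theorem pv_shift_range (c w : Int) :
    (PySem.List.pyRange 0 w 1).map (fun x => c + x) = PySem.List.pyRange c (c + w) 1 := by
  rw [PySem.List.pyRange_one, PySem.List.pyRange_one, List.map_map]
  have h : c + w - c = w - 0 := by ring
  rw [h]
  refine List.map_congr_left ?_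
  intro k _
  simp

theorem pv_key_list (w h : Int) (hw : 0 ≤ w) (hh : 0 ≤ h) :
    (PySem.List.pyRange 0 h 1).flatMap
      (fun y => (PySem.List.pyRange 0 w 1).map (fun x => y * w + x))
      = PySem.List.pyRange 0 (w * h) 1 := by
  induction h, hh using Int.le_induction with
  | base => simp
  | succ h hh0 ih =>
      rw [PySem.List.pyRange_one_append 0 h (h + 1) hh0 (by omega), List.flatMap_append, ih]
      have h2 : PySem.List.pyRange h (h + 1) 1 = [h] := by
        rw [PySem.List.pyRange_one]
        norm_num
      rw [h2]
      simp only [List.flatMap_cons, List.flatMap_nil, List.append_nil]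
      rw [pv_shift_range (h * w) w]
      have h4 : w * (h + 1) = w * h + w := by ring
      rw [h4, PySem.List.pyRange_one_append 0 (w * h) (w * h + w) (mul_nonneg hw hh0) (by omega)]
      have h5 : h * w = w * h := mul_comm h w
      rw [h5]

-- ---- A side: the nested insert loops produce the canonical map ----

theorem pv_nb_eq (w h x y : Int) (hw : 0 < w) (hx0 : 0 ≤ x) (hxw : x < w) :
    PySem.Set.ofList
      (((([] ++ (if x > 0 then [y * w + (x - 1)] else []))
        ++ (if x < w - 1 then [y * w + (x + 1)] else []))
        ++ (if y > 0 then [(y - 1) * w + x] else []))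
        ++ (if y < h - 1 then [(y + 1) * w + x] else []))
      = pvNb w h (y * w + x) := by
  have hcomm : y * w + x = x + w * y := by ring
  have hm : PySem.Int.mod (y * w + x) w = x := by
    rw [PySem.Int.mod_eq_emod_of_pos hw, hcomm, Int.add_mul_emod_self_left,
      Int.emod_eq_of_lt hx0 hxw]
  have hd : PySem.Int.floordiv (y * w + x) w = y := by
    rw [PySem.Int.floordiv_eq_ediv_of_pos hw, hcomm,
      Int.add_mul_ediv_left _ _ (ne_of_gt hw), Int.ediv_eq_zero_of_lt hx0 hxw, zero_add]
  have e1 : y * w + (x - 1) = y * w + x - 1 := by ring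
  have e2 : y * w + (x + 1) = y * w + x + 1 := by ring
  have e3 : (y - 1) * w + x = y * w + x - w := by ring
  have e4 : (y + 1) * w + x = y * w + x + w := by ring
  simp only [pvNb, hm, hd]
  rw [e1, e2, e3, e4]
  simp [List.append_assoc]

theorem pv_nested_eq (w h : Int) (hw : 0 < w) (hh : 0 < h) :
    (PySem.List.pyRange 0 h 1).foldl
      (fun g y => (PySem.List.pyRange 0 w 1).foldl
        (fun g x => g.insert (y * w + x)
          (PySem.Set.ofList
            (((([] ++ (if x > 0 then [y * w + (x - 1)] else []))
              ++ (if x < w - 1 then [y * w + (x + 1)] else []))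
              ++ (if y > 0 then [(y - 1) * w + x] else []))
              ++ (if y < h - 1 then [(y + 1) * w + x] else [])))) g)
      (PySem.Dict.mk ((PySem.List.pyRange 0 (w * h) 1).map
        (fun i => (i, (PySem.Set.empty : PySem.Set Int)))))
      = PySem.Dict.mk ((PySem.List.pyRange 0 (w * h) 1).map (fun i => (i, pvNb w h i))) := by
  trans ((PySem.List.pyRange 0 h 1).foldl
      (fun g y => (PySem.List.pyRange 0 w 1).foldl
        (fun g x => g.insert (y * w + x) (pvNb w h (y * w + x))) g)
      (PySem.Dict.mk ((PySem.List.pyRange 0 (w * h) 1).map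
        (fun i => (i, (PySem.Set.empty : PySem.Set Int))))))
  · apply PySem.List.foldl_congr_mem
    intro g y hy
    apply PySem.List.foldl_congr_mem
    intro g' x hx
    have hx' := PySem.List.mem_pyRange_one.mp hx
    rw [pv_nb_eq w h x y hw hx'.1 hx'.2]
  · have hfun : (fun (g : PySem.Dict Int (PySem.Set Int)) (y : Int) =>
        (PySem.List.pyRange 0 w 1).foldl
          (fun g x => g.insert (y * w + x) (pvNb w h (y * w + x))) g)
        = fun g y => (((PySem.List.pyRange 0 w 1).map (fun x => y * w + x)).foldl
          (fun g j => g.insert j (pvNb w h j)) g) := by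
      funext g y
      rw [List.foldl_map]
    rw [hfun, pv_foldl_flat, pv_key_list w h (le_of_lt hw) (le_of_lt hh)]
    rw [pv_foldl_insert_map (PySem.List.pyRange 0 (w * h) 1) (PySem.List.pyRange 0 (w * h) 1)
      (pvNb w h) (fun _ => PySem.Set.empty) (fun k hk => hk)]
    congr 1
    refine List.map_congr_left ?_
    intro i hi
    simp [hi]

theorem pv_A_items_pos (w h : Int) (hw : 0 < w) (hh : 0 < h) :
    grid_2d w h = (PySem.List.pyRange 0 (w * h) 1).map (fun i => (i, pvNb w h i)) := by
  have hinit :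
      ((PySem.List.pyRange 0 (w * h) 1).foldl (fun d i => d.insert i PySem.Set.empty)
        (PySem.Dict.empty : PySem.Dict Int (PySem.Set Int)))
      = PySem.Dict.mk ((PySem.List.pyRange 0 (w * h) 1).map
          (fun i => (i, (PySem.Set.empty : PySem.Set Int)))) := by
    apply PySem.Dict.ext
    rw [pv_foldl_fresh, pv_items_mk]
  simp only [grid_2d]
  rw [hinit, pv_nested_eq w h hw hh, pv_items_mk]

-- ---- B side: generic machinery for the modify-add operation stream ----

theorem pv_getD_map (L : List Int) (f : Int → PySem.Set Int) (k : Int)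
    (hnd : L.Nodup) (hk : k ∈ L) (dflt : PySem.Set Int) :
    (PySem.Dict.mk (L.map (fun i => (i, f i)))).getD k dflt = f k := by
  apply PySem.Dict.getD_of_mem_items
  · exact List.mem_map_of_mem hk
  · have : (PySem.Dict.mk (L.map (fun i => (i, f i)))).keys = L := by
      simp [PySem.Dict.keys_mk, List.map_map, Function.comp_def]
    rw [this]
    exact hnd

theorem pv_modify_map (L : List Int) (f : Int → PySem.Set Int) (k : Int)
    (g : PySem.Set Int → PySem.Set Int) (hnd : L.Nodup) (hk : k ∈ L) :
    (PySem.Dict.mk (L.map (fun i => (i, f i)))).modify k PySem.Set.empty g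
      = PySem.Dict.mk (L.map (fun i => (i, if i = k then g (f i) else f i))) := by
  have hmod : (PySem.Dict.mk (L.map (fun i => (i, f i)))).modify k PySem.Set.empty g
      = (PySem.Dict.mk (L.map (fun i => (i, f i)))).insert k
          (g ((PySem.Dict.mk (L.map (fun i => (i, f i)))).getD k PySem.Set.empty)) := rfl
  rw [hmod, pv_getD_map L f k hnd hk, pv_insert_map L f k (g (f k)) hk]
  congr 1
  refine List.map_congr_left ?_
  intro i _
  by_cases h : i = k <;> simp [h]

theorem pv_ops_fold (ops : List (Int × Int)) :
    ∀ (L : List Int) (f : Int → PySem.Set Int), L.Nodup → (∀ p ∈ ops, p.1 ∈ L) →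
      ops.foldl pvStep (PySem.Dict.mk (L.map (fun i => (i, f i))))
        = PySem.Dict.mk (L.map (fun i =>
            (i, ((ops.filter (fun p => p.1 == i)).map Prod.snd).foldl PySem.Set.add (f i)))) := by
  induction ops with
  | nil =>
      intro L f _ _
      simp
  | cons p t ih =>
      intro L f hnd hk
      rw [List.foldl_cons]
      have hstep : pvStep (PySem.Dict.mk (L.map (fun i => (i, f i)))) p
          = PySem.Dict.mk (L.map (fun i =>
              (i, if i = p.1 then PySem.Set.add (f i) p.2 else f i))) := by
        unfold pvStep
        exact pv_modify_map L f p.1 (fun s => PySem.Set.add s p.2) hnd (hk p (by simp))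
      rw [hstep, ih L _ hnd (fun q hq => hk q (by simp [hq]))]
      congr 1
      refine List.map_congr_left ?_
      intro i _
      by_cases h : p.1 = i
      · simp [List.filter_cons, beq_iff_eq.mpr h, h.symm]
      · simp [List.filter_cons, beq_eq_false_iff_ne.mpr h,
          show ¬ (i = p.1) from fun hc => h hc.symm]

theorem pv_pair_filter (k1 v1 k2 v2 i : Int) :
    List.filter (fun p => p.1 == i) [(k1, v1), (k2, v2)]
      = (if k1 = i then [(i, v1)] else []) ++ (if k2 = i then [(i, v2)] else []) := by
  by_cases h1 : k1 = i <;> by_cases h2 : k2 = i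
  · simp [List.filter, h1, h2]
  · simp [List.filter, h1, h2, beq_eq_false_iff_ne.mpr h2]
  · simp [List.filter, h1, h2, beq_eq_false_iff_ne.mpr h1]
  · simp [List.filter, h1, h2, beq_eq_false_iff_ne.mpr h1, beq_eq_false_iff_ne.mpr h2]

theorem pv_filter_flatMap {α β : Type} (l : List α) (f : α → List β) (p : β → Bool) :
    (l.flatMap f).filter p = l.flatMap (fun a => (f a).filter p) := by
  induction l with
  | nil => rfl
  | cons a t ih => simp [List.flatMap_cons, List.filter_append, ih]

theorem pv_flatMap_congr {α β : Type} (l : List α) (f g : α → List β)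
    (h : ∀ a ∈ l, f a = g a) : l.flatMap f = l.flatMap g := by
  induction l with
  | nil => rfl
  | cons a t ih =>
      simp only [List.flatMap_cons]
      rw [h a (by simp), ih (fun b hb => h b (by simp [hb]))]

theorem pv_flatMap_two_aux {α : Type} (L1 L2 : List α) (c a : Int) :
    ∀ (b : Int), a ≤ b →
      (PySem.List.pyRange a b 1).flatMap
        (fun x => (if x = c + 1 then L1 else []) ++ (if x = c then L2 else []))
      = (if a ≤ c ∧ c < b then L2 else []) ++ (if a ≤ c + 1 ∧ c + 1 < b then L1 else []) := by
  intro b hb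
  induction b, hb using Int.le_induction with
  | base =>
      rw [PySem.List.pyRange_one_eq_nil (le_refl a)]
      simp only [List.flatMap_nil]
      rw [if_neg (by omega), if_neg (by omega)]
      rfl
  | succ b hab ih =>
      rw [PySem.List.pyRange_one_succ_right hab, List.flatMap_append, ih]
      simp only [List.flatMap_cons, List.flatMap_nil, List.append_nil]
      split_ifs <;> first
        | (exfalso; omega)
        | simp
        | (simp; exfalso; omega)

theorem pv_flatMap_two {α : Type} (L1 L2 : List α) (c a b : Int) :
    (PySem.List.pyRange a b 1).flatMap
      (fun x => (if x = c + 1 then L1 else []) ++ (if x = c then L2 else []))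
    = (if a ≤ c ∧ c < b then L2 else []) ++ (if a ≤ c + 1 ∧ c + 1 < b then L1 else []) := by
  by_cases hab : a ≤ b
  · exact pv_flatMap_two_aux L1 L2 c a b hab
  · rw [PySem.List.pyRange_one_eq_nil (by omega)]
    simp only [List.flatMap_nil]
    rw [if_neg (by omega), if_neg (by omega)]
    rfl

theorem pv_flatMap_one {α : Type} (L : List α) (c a b : Int) :
    (PySem.List.pyRange a b 1).flatMap (fun x => if x = c then L else [])
    = if a ≤ c ∧ c < b then L else [] := by
  have h := pv_flatMap_two ([] : List α) L c a b
  have hcongr : (PySem.List.pyRange a b 1).flatMap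
      (fun x => (if x = c + 1 then ([] : List α) else []) ++ (if x = c then L else []))
      = (PySem.List.pyRange a b 1).flatMap (fun x => if x = c then L else []) := by
    refine pv_flatMap_congr _ _ _ ?_
    intro x _
    simp
  rw [hcongr] at h
  rw [h]
  by_cases hc : a ≤ c ∧ c < b <;> simp [hc]

-- a node index cannot sit in two different rows
theorem pv_row_eq (w y r x xi : Int) (hw : 0 < w) (hx0 : 0 ≤ x) (hxw : x < w)
    (hxi0 : 0 ≤ xi) (hxiw : xi < w) :
    y * w + x = r * w + xi ↔ y = r ∧ x = xi := by
  constructor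
  · intro h
    have hd0 : (y - r) * w = y * w - r * w := by ring
    have hyr : y = r := by
      by_contra hne
      rcases lt_or_gt_of_ne hne with hlt | hgt
      · have h1 : y - r ≤ -1 := by omega
        have h2 : (y - r) * w ≤ (-1) * w := mul_le_mul_of_nonneg_right h1 (le_of_lt hw)
        have h3 : (-1 : Int) * w = -w := by ring
        omega
      · have h1 : (1 : Int) ≤ y - r := by omega
        have h2 : (1 : Int) * w ≤ (y - r) * w := mul_le_mul_of_nonneg_right h1 (le_of_lt hw)
        have h3 : (1 : Int) * w = w := by ring
        omega
    refine ⟨hyr, ?_⟩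
    have hyw : y * w = r * w := by rw [hyr]
    omega
  · rintro ⟨h1, h2⟩
    subst h1; subst h2; rfl

-- filtered operation stream of one row, for a node i = r*w + xi
theorem pv_filter_horiz (w y r xi i : Int) (hw : 0 < w) (hxi0 : 0 ≤ xi) (hxiw : xi < w)
    (hi : r * w + xi = i) :
    (pvHorizOps w y).filter (fun p => p.1 == i)
      = if y = r then
          (if 0 < xi then [(i, i - 1)] else []) ++ (if xi < w - 1 then [(i, i + 1)] else [])
        else [] := by
  unfold pvHorizOps
  rw [pv_filter_flatMap]
  by_cases hy : y = r
  · rw [if_pos hy]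
    have hyw : y * w = r * w := by rw [hy]
    have hcongr : ∀ x ∈ PySem.List.pyRange 1 w 1,
        List.filter (fun p => p.1 == i) [(y * w + x - 1, y * w + x), (y * w + x, y * w + x - 1)]
          = (if x = xi + 1 then [(i, i + 1)] else []) ++ (if x = xi then [(i, i - 1)] else []) := by
      intro x hx
      rw [pv_pair_filter]
      by_cases h1 : x = xi + 1
      · rw [if_pos (by omega : y * w + x - 1 = i), if_neg (by omega : ¬ y * w + x = i),
          if_pos h1, if_neg (by omega : ¬ x = xi),
          (by omega : y * w + x = i + 1)]
      · by_cases h2 : x = xi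
        · rw [if_neg (by omega : ¬ y * w + x - 1 = i), if_pos (by omega : y * w + x = i),
            if_neg h1, if_pos h2, (by omega : y * w + x - 1 = i - 1)]
        · rw [if_neg (by omega : ¬ y * w + x - 1 = i), if_neg (by omega : ¬ y * w + x = i),
            if_neg h1, if_neg h2]
    rw [pv_flatMap_congr _ _ _ hcongr, pv_flatMap_two]
    have c1 : (1 ≤ xi ∧ xi < w) ↔ 0 < xi := by omega
    have c2 : (1 ≤ xi + 1 ∧ xi + 1 < w) ↔ xi < w - 1 := by omega
    rw [if_congr c1 rfl rfl, if_congr c2 rfl rfl]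
  · rw [if_neg hy]
    have hcongr : ∀ x ∈ PySem.List.pyRange 1 w 1,
        List.filter (fun p => p.1 == i) [(y * w + x - 1, y * w + x), (y * w + x, y * w + x - 1)]
          = ([] : List (Int × Int)) := by
      intro x hx
      have hx' := PySem.List.mem_pyRange_one.mp hx
      rw [pv_pair_filter]
      have hk1 : ¬ (y * w + x - 1 = i) := by
        intro hc
        have hc' : y * w + (x - 1) = r * w + xi := by omega
        exact hy ((pv_row_eq w y r (x - 1) xi hw (by omega) (by omega) hxi0 hxiw).mp hc').1
      have hk2 : ¬ (y * w + x = i) := by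
        intro hc
        have hc' : y * w + x = r * w + xi := by omega
        exact hy ((pv_row_eq w y r x xi hw (by omega) (by omega) hxi0 hxiw).mp hc').1
      rw [if_neg hk1, if_neg hk2]
      rfl
    rw [pv_flatMap_congr _ _ _ hcongr]
    simp

theorem pv_filter_vert (w y r xi i : Int) (hw : 0 < w) (hxi0 : 0 ≤ xi) (hxiw : xi < w)
    (hi : r * w + xi = i) :
    (pvVertOps w y).filter (fun p => p.1 == i)
      = if y = r then [(i, i - w)] else if y = r + 1 then [(i, i + w)] else [] := by
  unfold pvVertOps
  rw [pv_filter_flatMap]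
  by_cases hy : y = r
  · rw [if_pos hy]
    have hyw : y * w = r * w := by rw [hy]
    have hcongr : ∀ x ∈ PySem.List.pyRange 0 w 1,
        List.filter (fun p => p.1 == i) [(y * w - w + x, y * w + x), (y * w + x, y * w - w + x)]
          = (if x = xi then [(i, i - w)] else []) := by
      intro x hx
      have hx' := PySem.List.mem_pyRange_one.mp hx
      rw [pv_pair_filter]
      have hk1 : ¬ (y * w - w + x = i) := by
        intro hc
        have hrw : (y - 1) * w = y * w - w := by ring
        have hc' : (y - 1) * w + x = r * w + xi := by omega
        have := ((pv_row_eq w (y - 1) r x xi hw hx'.1 hx'.2 hxi0 hxiw).mp hc').1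
        omega
      rw [if_neg hk1, List.nil_append]
      by_cases h2 : x = xi
      · rw [if_pos (by omega : y * w + x = i), if_pos h2,
          (by omega : y * w - w + x = i - w)]
      · rw [if_neg (by omega : ¬ y * w + x = i), if_neg h2]
    rw [pv_flatMap_congr _ _ _ hcongr, pv_flatMap_one, if_pos ⟨hxi0, hxiw⟩]
  · rw [if_neg hy]
    by_cases hy1 : y = r + 1
    · rw [if_pos hy1]
      have hyw : y * w = r * w + w := by rw [hy1]; ring
      have hcongr : ∀ x ∈ PySem.List.pyRange 0 w 1,
          List.filter (fun p => p.1 == i) [(y * w - w + x, y * w + x), (y * w + x, y * w - w + x)]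
            = (if x = xi then [(i, i + w)] else []) := by
        intro x hx
        have hx' := PySem.List.mem_pyRange_one.mp hx
        rw [pv_pair_filter]
        have hk2 : ¬ (y * w + x = i) := by
          intro hc
          have hc' : y * w + x = r * w + xi := by omega
          exact hy ((pv_row_eq w y r x xi hw hx'.1 hx'.2 hxi0 hxiw).mp hc').1
        rw [if_neg hk2, List.append_nil]
        by_cases h2 : x = xi
        · rw [if_pos (by omega : y * w - w + x = i), if_pos h2,
            (by omega : y * w + x = i + w)]
        · rw [if_neg (by omega : ¬ y * w - w + x = i), if_neg h2]
      rw [pv_flatMap_congr _ _ _ hcongr, pv_flatMap_one, if_pos ⟨hxi0, hxiw⟩]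
    · rw [if_neg hy1]
      have hcongr : ∀ x ∈ PySem.List.pyRange 0 w 1,
          List.filter (fun p => p.1 == i) [(y * w - w + x, y * w + x), (y * w + x, y * w - w + x)]
            = ([] : List (Int × Int)) := by
        intro x hx
        have hx' := PySem.List.mem_pyRange_one.mp hx
        rw [pv_pair_filter]
        have hk1 : ¬ (y * w - w + x = i) := by
          intro hc
          have hrw : (y - 1) * w = y * w - w := by ring
          have hc' : (y - 1) * w + x = r * w + xi := by omega
          have := ((pv_row_eq w (y - 1) r x xi hw hx'.1 hx'.2 hxi0 hxiw).mp hc').1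
          omega
        have hk2 : ¬ (y * w + x = i) := by
          intro hc
          have hc' : y * w + x = r * w + xi := by omega
          exact hy ((pv_row_eq w y r x xi hw hx'.1 hx'.2 hxi0 hxiw).mp hc').1
        rw [if_neg hk1, if_neg hk2]
        rfl
      rw [pv_flatMap_congr _ _ _ hcongr]
      simp

theorem pv_filter_ops (w h i : Int) (hw : 0 < w) (hh : 0 < h) (h0 : 0 ≤ i) (hn : i < w * h) :
    ((pvAllOps w h).filter (fun p => p.1 == i)).map Prod.snd
      = ((if 0 < PySem.Int.mod i w then [i - 1] else [])
          ++ (if PySem.Int.mod i w < w - 1 then [i + 1] else []))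
        ++ ((if 0 < PySem.Int.floordiv i w then [i - w] else [])
          ++ (if PySem.Int.floordiv i w < h - 1 then [i + w] else [])) := by
  set r := PySem.Int.floordiv i w with hr
  set xi := PySem.Int.mod i w with hxi
  have hxi0 : 0 ≤ xi := by rw [hxi]; exact PySem.Int.mod_nonneg i hw
  have hxiw : xi < w := by rw [hxi]; exact PySem.Int.mod_lt i hw
  have hi : r * w + xi = i := by rw [hr, hxi]; exact PySem.Int.floordiv_mul_add_mod i w
  have hr0 : 0 ≤ r := by
    rw [hr]
    exact (PySem.Int.le_floordiv_iff_mul_le hw).mpr (by omega)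
  have hrh : r < h := by
    rw [hr]
    refine (PySem.Int.floordiv_lt_iff_lt_mul hw).mpr ?_
    calc i < w * h := hn
      _ = h * w := mul_comm w h
  unfold pvAllOps
  rw [pv_filter_flatMap]
  have hrow : ∀ y ∈ PySem.List.pyRange 0 h 1,
      (pvRowOps w y).filter (fun p => p.1 == i)
        = (if y = r + 1 then [(i, i + w)] else [])
          ++ (if y = r then
                ((if 0 < xi then [(i, i - 1)] else []) ++ (if xi < w - 1 then [(i, i + 1)] else []))
                  ++ (if 0 < r then [(i, i - w)] else [])
              else []) := by
    intro y hy
    have hy' := PySem.List.mem_pyRange_one.mp hy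
    unfold pvRowOps
    rw [List.filter_append, pv_filter_horiz w y r xi i hw hxi0 hxiw hi]
    by_cases h0y : 0 < y
    · rw [if_pos h0y, pv_filter_vert w y r xi i hw hxi0 hxiw hi]
      by_cases hyr : y = r
      · simp only [if_pos hyr, if_neg (show ¬ y = r + 1 by omega),
          if_pos (show 0 < r by omega)]
        simp
      · simp only [if_neg hyr]
        by_cases hyr1 : y = r + 1
        · simp only [if_pos hyr1]
          simp
        · simp only [if_neg hyr1]
    · rw [if_neg h0y, List.filter_nil]
      by_cases hyr : y = r
      · simp only [if_pos hyr, if_neg (show ¬ y = r + 1 by omega),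
          if_neg (show ¬ 0 < r by omega)]
        simp
      · simp only [if_neg hyr, if_neg (show ¬ y = r + 1 by omega)]
  rw [pv_flatMap_congr _ _ _ hrow, pv_flatMap_two, if_pos ⟨hr0, hrh⟩]
  have hD : (0 ≤ r + 1 ∧ r + 1 < h) ↔ r < h - 1 := by omega
  rw [if_congr hD rfl rfl]
  by_cases c1 : 0 < xi <;> by_cases c2 : xi < w - 1 <;> by_cases c3 : 0 < r <;>
    by_cases c4 : r < h - 1 <;>
    simp [c1, c2, c3, c4]

-- ops in the stream only touch keys of range(0, w*h)
theorem pv_ops_keys (w h : Int) (hw : 0 < w) (hh : 0 < h) :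
    ∀ p ∈ pvAllOps w h, p.1 ∈ PySem.List.pyRange 0 (w * h) 1 := by
  intro p hp
  unfold pvAllOps at hp
  rw [List.mem_flatMap] at hp
  obtain ⟨y, hy, hpy⟩ := hp
  have hy' := PySem.List.mem_pyRange_one.mp hy
  have hkey : 0 ≤ p.1 ∧ p.1 < w * h := by
    unfold pvRowOps at hpy
    have hbound : ∀ (q : Int), 0 ≤ q → q < h → ∀ x, 0 ≤ x → x < w → 0 ≤ q * w + x ∧ q * w + x < w * h := by
      intro q hq0 hqh x hx0 hxw
      constructor
      · have : 0 ≤ q * w := mul_nonneg hq0 (le_of_lt hw)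
        omega
      · have h1 : q + 1 ≤ h := by omega
        have h2 : (q + 1) * w ≤ h * w := mul_le_mul_of_nonneg_right h1 (le_of_lt hw)
        have h3 : (q + 1) * w = q * w + w := by ring
        have h4 : h * w = w * h := mul_comm h w
        omega
    rw [List.mem_append] at hpy
    rcases hpy with hpy | hpy
    · unfold pvHorizOps at hpy
      rw [List.mem_flatMap] at hpy
      obtain ⟨x, hx, hmem⟩ := hpy
      have hx' := PySem.List.mem_pyRange_one.mp hx
      simp only [List.mem_cons, List.mem_singleton] at hmem
      rcases hmem with h | h | h
      · have : p.1 = y * w + (x - 1) := by rw [h]; ring_nf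
        rw [this]
        exact hbound y hy'.1 hy'.2 (x - 1) (by omega) (by omega)
      · have : p.1 = y * w + x := by rw [h]
        rw [this]
        exact hbound y hy'.1 hy'.2 x (by omega) (by omega)
      · exact absurd h (by simp)
    · by_cases h0y : 0 < y
      · rw [if_pos h0y] at hpy
        unfold pvVertOps at hpy
        rw [List.mem_flatMap] at hpy
        obtain ⟨x, hx, hmem⟩ := hpy
        have hx' := PySem.List.mem_pyRange_one.mp hx
        simp only [List.mem_cons, List.mem_singleton] at hmem
        rcases hmem with h | h | h
        · have : p.1 = (y - 1) * w + x := by rw [h]; ring_nf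
          rw [this]
          exact hbound (y - 1) (by omega) (by omega) x hx'.1 hx'.2
        · have : p.1 = y * w + x := by rw [h]
          rw [this]
          exact hbound y hy'.1 hy'.2 x hx'.1 hx'.2
        · exact absurd h (by simp)
      · rw [if_neg h0y] at hpy
        exact absurd hpy (by simp)
  exact PySem.List.mem_pyRange_one.mpr ⟨hkey.1, hkey.2⟩

-- B's nested loops are exactly the flat operation stream
theorem pv_B_fold_eq (w h : Int) (g0 : PySem.Dict Int (PySem.Set Int)) :
    (PySem.List.pyRange 0 h 1).foldl (fun g y =>
      if y > 0 then
        (PySem.List.pyRange 0 w 1).foldl (fun g x =>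
          (g.modify (y * w - w + x) PySem.Set.empty
              (fun s => PySem.Set.add s (y * w + x))).modify
            (y * w + x) PySem.Set.empty (fun s => PySem.Set.add s (y * w - w + x)))
          ((PySem.List.pyRange 1 w 1).foldl (fun g x =>
            (g.modify (y * w + x - 1) PySem.Set.empty
                (fun s => PySem.Set.add s (y * w + x))).modify
              (y * w + x) PySem.Set.empty (fun s => PySem.Set.add s (y * w + x - 1))) g)
      else
        (PySem.List.pyRange 1 w 1).foldl (fun g x =>
          (g.modify (y * w + x - 1) PySem.Set.empty
              (fun s => PySem.Set.add s (y * w + x))).modify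
            (y * w + x) PySem.Set.empty (fun s => PySem.Set.add s (y * w + x - 1))) g) g0
    = (pvAllOps w h).foldl pvStep g0 := by
  unfold pvAllOps
  rw [← pv_foldl_flat]
  apply PySem.List.foldl_congr_mem
  intro g y _
  have hhoriz : ∀ (g : PySem.Dict Int (PySem.Set Int)),
      (PySem.List.pyRange 1 w 1).foldl (fun g x =>
          (g.modify (y * w + x - 1) PySem.Set.empty
              (fun s => PySem.Set.add s (y * w + x))).modify
            (y * w + x) PySem.Set.empty (fun s => PySem.Set.add s (y * w + x - 1))) g
        = (pvHorizOps w y).foldl pvStep g := by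
    intro g
    unfold pvHorizOps
    rw [← pv_foldl_flat]
    rfl
  show _ = (pvRowOps w y).foldl pvStep g
  unfold pvRowOps
  rw [List.foldl_append, hhoriz]
  by_cases h0y : 0 < y
  · rw [if_pos h0y, if_pos h0y]
    unfold pvVertOps
    rw [← pv_foldl_flat]
    rfl
  · rw [if_neg h0y, if_neg h0y]
    rfl

theorem pv_B_items_pos (w h : Int) (hw : 0 < w) (hh : 0 < h) :
    grid_2d_alt w h = (PySem.List.pyRange 0 (w * h) 1).map (fun i => (i, pvNb w h i)) := by
  have hinit :
      ((PySem.List.pyRange 0 (w * h) 1).foldl (fun d i => d.insert i PySem.Set.empty)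
        (PySem.Dict.empty : PySem.Dict Int (PySem.Set Int)))
      = PySem.Dict.mk ((PySem.List.pyRange 0 (w * h) 1).map
          (fun i => (i, (PySem.Set.empty : PySem.Set Int)))) := by
    apply PySem.Dict.ext
    rw [pv_foldl_fresh, pv_items_mk]
  simp only [grid_2d_alt]
  rw [hinit, pv_B_fold_eq w h,
    pv_ops_fold (pvAllOps w h) (PySem.List.pyRange 0 (w * h) 1) (fun _ => PySem.Set.empty)
      (PySem.List.nodup_pyRange_one 0 (w * h)) (pv_ops_keys w h hw hh), pv_items_mk]
  refine List.map_congr_left ?_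
  intro i hi
  have hi' := PySem.List.mem_pyRange_one.mp hi
  have hval : (((pvAllOps w h).filter (fun p => p.1 == i)).map Prod.snd).foldl
      PySem.Set.add PySem.Set.empty = pvNb w h i := by
    rw [pv_filter_ops w h i hw hh hi'.1 hi'.2, pvNb, PySem.Set.ofList_eq_foldl]
    rfl
  rw [hval]

-- ---- degenerate sizes ----

theorem pv_trivial_h (w h : Int) (hh : h ≤ 0) : grid_2d w h = grid_2d_alt w h := by
  simp only [grid_2d, grid_2d_alt]
  rw [PySem.List.pyRange_one_eq_nil hh]
  simp only [List.foldl_nil]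

theorem pv_A_trivial_w (w h : Int) (hw : w ≤ 0) (hh : 0 < h) : grid_2d w h = [] := by
  have hn : w * h ≤ 0 := mul_nonpos_iff.mpr (Or.inr ⟨hw, le_of_lt hh⟩)
  simp only [grid_2d]
  rw [PySem.List.pyRange_one_eq_nil hn, PySem.List.pyRange_one_eq_nil hw]
  simp only [List.foldl_nil]
  rw [pv_foldl_id]
  rfl

theorem pv_B_trivial_w (w h : Int) (hw : w ≤ 0) (hh : 0 < h) : grid_2d_alt w h = [] := by
  have hn : w * h ≤ 0 := mul_nonpos_iff.mpr (Or.inr ⟨hw, le_of_lt hh⟩)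
  simp only [grid_2d_alt]
  rw [PySem.List.pyRange_one_eq_nil hn, PySem.List.pyRange_one_eq_nil (by omega : w ≤ 1),
    PySem.List.pyRange_one_eq_nil hw]
  simp only [List.foldl_nil, ite_self]
  rw [pv_foldl_id]
  rfl

-- ===== VERDICT (by name: the statement is the Claim_ definition above) =====
theorem grid_2d_spec : Claim_equal_grid_2d := by
  intro w h _
  show grid_2d w h = grid_2d_alt w h
  by_cases hh : 0 < h
  · by_cases hw : 0 < w
    · rw [pv_A_items_pos w h hw hh, pv_B_items_pos w h hw hh]
    · rw [pv_A_trivial_w w h (by omega) hh, pv_B_trivial_w w h (by omega) hh]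
  · exact pv_trivial_h w h (by omega)
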